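-- pv_equiv track=rewrite | github.com/davardanian/gridu-data-gen | core/ddl_parser.py | _split_column_definitions
-- ===== SOURCE A (Python) =====
-- from typing import Dict, List, Optional, Tuple
--
-- def _split_column_definitions(columns_text: str) -> List[str]:
--     """Split column definitions by comma, respecting nested parentheses"""
--     definitions = []
--     current_def = ""
--     paren_count = 0
--
--     for char in columns_text:
--         if char == '(':
--             paren_count += 1
--         elif char == ')':
--             paren_count -= 1
--         elif char == ',' and paren_count == 0:
--             definitions.append(current_def.strip())
--             current_def = ""
--             continue
--
--         current_def += char
--
--     if current_def.strip():
--         definitions.append(current_def.strip())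
--
--     return definitions
-- ===== SOURCE B (Python) =====
-- from typing import Dict, List, Optional, Tuple
--
-- def _split_column_definitions(columns_text: str) -> List[str]:
--     """Split on top-level commas by splitting on every comma first, then
--     re-merging adjacent pieces while a running parenthesis balance is open."""
--     segments = columns_text.split(',')
--     definitions = []
--     buf = []
--     balance = 0
--     for seg in segments[:-1]:
--         buf.append(seg)
--         balance += seg.count('(') - seg.count(')')
--         if balance == 0:
--             definitions.append(','.join(buf).strip())
--             buf = []
--             balance = 0
--     buf.append(segments[-1])
--     last = ','.join(buf).strip()
--     if last:
--         definitions.append(last)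
--     return definitions
-- ===== Notes on version B (the rewrite author's own statement) =====
-- stated objective: faster
-- what changed: B replaces A's character-by-character scan that grows the current definition one char at a time with a split-on-every-comma pass followed by balance-driven re-merging of adjacent pieces (joined back with ','), so per-char Python work becomes bulk str.split/str.join/str.count operations.
import Mathlib
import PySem

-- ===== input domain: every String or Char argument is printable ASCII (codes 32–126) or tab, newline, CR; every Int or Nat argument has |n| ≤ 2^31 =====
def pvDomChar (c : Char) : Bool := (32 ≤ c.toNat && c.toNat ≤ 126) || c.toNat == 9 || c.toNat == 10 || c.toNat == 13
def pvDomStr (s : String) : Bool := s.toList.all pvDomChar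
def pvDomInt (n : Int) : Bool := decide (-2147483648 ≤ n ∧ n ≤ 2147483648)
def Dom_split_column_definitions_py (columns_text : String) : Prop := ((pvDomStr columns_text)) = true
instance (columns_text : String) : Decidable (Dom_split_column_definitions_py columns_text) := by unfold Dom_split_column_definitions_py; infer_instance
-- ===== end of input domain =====

-- B re-implements the top-level comma split as split-on-every-comma followed by balance-driven
-- re-merging (objective: faster by a constant factor — bulk split/join/count instead of per-char work).

-- ===== PORT A =====
-- A's char loop: state (definitions, current_def, paren_count)
def pvALoop : List Char → List String → List Char → Int → List String
  | [], defs, cur, _ =>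
      if (PySem.Chars.strip cur).isEmpty then defs
      else defs ++ [String.ofList (PySem.Chars.strip cur)]
  | c :: rest, defs, cur, pc =>
      if c = '(' then pvALoop rest defs (cur ++ [c]) (pc + 1)
      else if c = ')' then pvALoop rest defs (cur ++ [c]) (pc - 1)
      else if c = ',' ∧ pc = 0 then
        pvALoop rest (defs ++ [String.ofList (PySem.Chars.strip cur)]) [] pc
      else pvALoop rest defs (cur ++ [c]) pc

def split_column_definitions_py (columns_text : String) : List String :=
  pvALoop columns_text.toList [] [] 0

-- ===== PORT B =====
-- Source B's loop over segments[:-1] then the final segment: state (definitions, buf, balance).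
-- Python's seg.count('(') with a one-char needle is exactly the char count List.count '(' seg.
def pvBLoop : List (List Char) → List String → List (List Char) → Int → List String
  | [], out, _, _ => out   -- unreachable: str.split never returns an empty list
  | [last], out, buf, _ =>
      let s := PySem.Chars.strip (PySem.Chars.join [','] (buf ++ [last]))
      if s.isEmpty then out else out ++ [String.ofList s]
  | seg :: next :: rest, out, buf, bal =>
      let bal' := bal + (seg.count '(' : Int) - (seg.count ')' : Int)
      if bal' = 0 then
        pvBLoop (next :: rest)
          (out ++ [String.ofList (PySem.Chars.strip (PySem.Chars.join [','] (buf ++ [seg])))]) [] 0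
      else pvBLoop (next :: rest) out (buf ++ [seg]) bal'

def split_column_definitions_py_alt (columns_text : String) : List String :=
  pvBLoop (columns_text.toList.splitOn ',') [] [] 0

-- ===== PRECONDITION & SPEC =====
def Spec_split_column_definitions_py (columns_text : String) (out : List String) : Prop := out = split_column_definitions_py_alt columns_text
instance (columns_text : String) (out : List String) : Decidable (Spec_split_column_definitions_py columns_text out) := by unfold Spec_split_column_definitions_py; infer_instance

-- ===== CLAIM (what is proved, stated in full; the proofs are below) =====
def Claim_equal_split_column_definitions_py : Prop := ∀ (columns_text : String), Dom_split_column_definitions_py columns_text → Spec_split_column_definitions_py columns_text (split_column_definitions_py columns_text)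

-- ===== LEMMAS AND PROOFS =====

-- balance contributed by a piece of text
def pvBal (cs : List Char) : Int := (cs.count '(' : Int) - (cs.count ')' : Int)

-- prepend pending text onto the first segment of a split
def pvConsHead (cur : List Char) : List (List Char) → List (List Char)
  | [] => [cur]
  | h :: t => (cur ++ h) :: t

lemma pv_join_snoc (xs : List (List Char)) (y : List Char) :
    PySem.Chars.join [','] (xs ++ [y])
      = PySem.Chars.join [','] xs ++ (if xs.isEmpty then [] else [',']) ++ y := by
  induction xs with
  | nil => simp [PySem.Chars.join_singleton, PySem.Chars.join_nil]
  | cons x xs ih =>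
    cases xs with
    | nil => simp [PySem.Chars.join_cons_cons, PySem.Chars.join_singleton]
    | cons x2 t =>
      simp only [List.cons_append] at ih
      simp only [List.cons_append, PySem.Chars.join_cons_cons, ih]
      simp [List.append_assoc]

lemma pv_join_snoc_ext (buf : List (List Char)) (cur z : List Char) :
    PySem.Chars.join [','] (buf ++ [cur ++ z])
      = PySem.Chars.join [','] (buf ++ [cur]) ++ z := by
  rw [pv_join_snoc, pv_join_snoc]
  simp [List.append_assoc]

lemma pv_join_comma (buf : List (List Char)) (cur : List Char) :
    PySem.Chars.join [','] ((buf ++ [cur]) ++ [([] : List Char)])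
      = PySem.Chars.join [','] (buf ++ [cur]) ++ [','] := by
  rw [pv_join_snoc]
  simp

lemma pv_bal_snoc (cur : List Char) (c : Char) :
    pvBal (cur ++ [c]) = pvBal cur
      + (if c = '(' then 1 else 0) - (if c = ')' then 1 else 0) := by
  simp only [pvBal, List.count_append, List.count_singleton']
  by_cases h1 : c = '(' <;> by_cases h2 : c = ')' <;> simp_all <;> omega

lemma pv_splitOn_ne_nil (l : List Char) : l.splitOn ',' ≠ [] := by
  simp only [List.splitOn]
  exact List.splitOnP_ne_nil _ _

lemma pv_main (l : List Char) : ∀ (defs : List String) (buf : List (List Char)) (cur : List Char) (bal : Int),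
    pvALoop l defs (PySem.Chars.join [','] (buf ++ [cur])) (bal + pvBal cur)
      = pvBLoop (pvConsHead cur (l.splitOn ',')) defs buf bal := by
  induction l with
  | nil =>
    intro defs buf cur bal
    have h0 : ([] : List Char).splitOn ',' = [[]] := List.splitOn_nil ',' 
    rw [h0]
    simp [pvALoop, pvConsHead, pvBLoop]
  | cons c rest ih =>
    intro defs buf cur bal
    obtain ⟨h, t, ht⟩ : ∃ h t, rest.splitOn ',' = h :: t := by
      cases hre : rest.splitOn ',' with
      | nil => exact absurd hre (pv_splitOn_ne_nil rest)
      | cons a b => exact ⟨a, b, rfl⟩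
    have hsp : (c :: rest).splitOn ',' = if c = ','
        then [] :: rest.splitOn ','
        else (rest.splitOn ',').modifyHead (List.cons c) := by
      simp [List.splitOn, List.splitOnP_cons]
    by_cases hc : c = ','
    · subst hc
      rw [hsp, if_pos rfl, ht]
      by_cases hb : bal + pvBal cur = 0
      · -- top-level comma: emit the stripped buffer
        have hA : pvALoop (',' :: rest) defs (PySem.Chars.join [','] (buf ++ [cur])) (bal + pvBal cur)
            = pvALoop rest (defs ++ [String.ofList (PySem.Chars.strip (PySem.Chars.join [','] (buf ++ [cur])))]) [] (bal + pvBal cur) := by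
          simp [pvALoop, hb]
        rw [hA, hb]
        have h2 := ih (defs ++ [String.ofList (PySem.Chars.strip (PySem.Chars.join [','] (buf ++ [cur])))]) [] [] 0
        simp only [List.nil_append, PySem.Chars.join_singleton, pvBal, List.count_nil,
          CharP.cast_eq_zero, sub_zero, add_zero, ht] at h2
        rw [h2]
        have hb' : bal + ((cur.count '(' : Int)) - ((cur.count ')' : Int)) = 0 := by
          unfold pvBal at hb; omega
        simp [pvConsHead, pvBLoop, hb']
      · -- nested comma: keep accumulating
        have hA : pvALoop (',' :: rest) defs (PySem.Chars.join [','] (buf ++ [cur])) (bal + pvBal cur)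
            = pvALoop rest defs (PySem.Chars.join [','] (buf ++ [cur]) ++ [',']) (bal + pvBal cur) := by
          simp [pvALoop, hb]
        rw [hA, ← pv_join_comma]
        have h2 := ih defs (buf ++ [cur]) [] (bal + pvBal cur)
        rw [ht] at h2
        have hz : pvBal ([] : List Char) = 0 := by simp [pvBal]
        rw [hz, add_zero] at h2
        rw [h2]
        have hb' : ¬ (bal + ((cur.count '(' : Int)) - ((cur.count ')' : Int)) = 0) := by
          unfold pvBal at hb; omega
        simp only [pvConsHead, List.nil_append, List.append_nil, pvBLoop, if_neg hb']
        rw [show bal + ((cur.count '(' : Int)) - ((cur.count ')' : Int)) = bal + pvBal cur from by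
          unfold pvBal; ring]
    · -- ordinary character (including parens): extend the current piece
      rw [hsp, if_neg hc, ht]
      have hA : pvALoop (c :: rest) defs (PySem.Chars.join [','] (buf ++ [cur])) (bal + pvBal cur)
          = pvALoop rest defs (PySem.Chars.join [','] (buf ++ [cur]) ++ [c]) (bal + pvBal (cur ++ [c])) := by
        rw [pv_bal_snoc]
        by_cases h1 : c = '('
        · subst h1; simp [pvALoop]; ring_nf
        · by_cases h2 : c = ')'
          · subst h2; simp [pvALoop, h1]; ring_nf
          · simp [pvALoop, h1, h2, hc]
      rw [hA, ← pv_join_snoc_ext]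
      have := ih defs buf (cur ++ [c]) bal
      rw [ht] at this
      rw [this]
      simp [pvConsHead, List.modifyHead]

-- ===== VERDICT (by name: the statement is the Claim_ definition above) =====
theorem split_column_definitions_py_spec : Claim_equal_split_column_definitions_py := by
  intro s _
  unfold Spec_split_column_definitions_py split_column_definitions_py split_column_definitions_py_alt
  have := pv_main s.toList [] [] [] 0
  obtain ⟨h, t, ht⟩ : ∃ h t, s.toList.splitOn ',' = h :: t := by
    cases hre : s.toList.splitOn ',' with
    | nil => exact absurd hre (pv_splitOn_ne_nil s.toList)
    | cons a b => exact ⟨a, b, rfl⟩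
  rw [ht] at this ⊢
  simp only [List.nil_append, PySem.Chars.join_singleton, pvBal, List.count_nil,
    CharP.cast_eq_zero, sub_zero, add_zero, pvConsHead] at this
  simpa using this
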